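-- pv_equiv track=rewrite | github.com/nickmflorin/instagram-attack | lib/utils.py | generate_alterations
-- ===== SOURCE A (Python) =====
-- def generate_alterations(passwords):
--     altered = []
--     # first_level = ['', 'a', '13579', '24680', '09', '1523', '1719', '0609',
--     #     '0691', '0991', '36606', '3660664', '6951', '20002']
--     first_level = ['123', '1234', '1324', '9887', '']
--     second_level = ['!', '!!', '!!!', '@', '`', '!a', '@!', 'a@!']
--
--     for pw in passwords:
--         altered.append(pw)
--         for alteration in first_level:
--             altered.append(pw + alteration)
--             for two_alteration in second_level:
--                 altered.append(pw + alteration + two_alteration)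
--     return altered
-- ===== SOURCE B (Python) =====
-- def generate_alterations(passwords):
--     first_level = ['123', '1234', '1324', '9887', '']
--     second_level = ['!', '!!', '!!!', '@', '`', '!a', '@!', 'a@!']
--     suffixes = ['']
--     for alt in first_level:
--         suffixes.append(alt)
--         suffixes.extend(alt + two for two in second_level)
--     return [pw + s for pw in passwords for s in suffixes]
-- ===== Notes on version B (the rewrite author's own statement) =====
-- stated objective: simpler
-- what changed: B precomputes the constant 46-entry suffix table once (in A's exact emission order) and emits the result as one flat passwords-times-suffixes comprehension, replacing A's three-level nested loop that rebuilds pw+alt prefixes per password.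
import Mathlib
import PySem

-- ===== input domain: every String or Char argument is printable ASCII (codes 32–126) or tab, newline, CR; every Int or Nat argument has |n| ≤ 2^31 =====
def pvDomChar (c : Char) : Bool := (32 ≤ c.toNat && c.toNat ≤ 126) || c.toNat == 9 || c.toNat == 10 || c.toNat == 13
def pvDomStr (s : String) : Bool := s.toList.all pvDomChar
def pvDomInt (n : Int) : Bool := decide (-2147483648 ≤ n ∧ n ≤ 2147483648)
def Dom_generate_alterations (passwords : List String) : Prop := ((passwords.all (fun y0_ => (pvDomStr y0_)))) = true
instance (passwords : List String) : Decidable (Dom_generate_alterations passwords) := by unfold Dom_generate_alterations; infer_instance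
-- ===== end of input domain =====

-- B precomputes the constant suffix table once and emits one flat pass (simpler); A nests three loops.

-- ===== PORT A =====
def pvFirstLevel : List String := ["123", "1234", "1324", "9887", ""]
def pvSecondLevel : List String := ["!", "!!", "!!!", "@", "`", "!a", "@!", "a@!"]

def generate_alterations (passwords : List String) : List String :=
  passwords.foldl (fun altered pw =>
    pvFirstLevel.foldl (fun acc alteration =>
      pvSecondLevel.foldl (fun acc2 two_alteration =>
        acc2 ++ [pw ++ alteration ++ two_alteration])
        (acc ++ [pw ++ alteration]))
      (altered ++ [pw])) []

-- ===== PORT B =====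
def pvSuffixes : List String :=
  pvFirstLevel.foldl (fun suffixes alt =>
    (suffixes ++ [alt]) ++ pvSecondLevel.map (fun two => alt ++ two)) [""]

def generate_alterations_alt (passwords : List String) : List String :=
  passwords.flatMap (fun pw => pvSuffixes.map (fun s => pw ++ s))

-- ===== PRECONDITION & SPEC =====
def Spec_generate_alterations (passwords : List String) (out : List String) : Prop := out = generate_alterations_alt passwords
instance (passwords : List String) (out : List String) : Decidable (Spec_generate_alterations passwords out) := by unfold Spec_generate_alterations; infer_instance

-- ===== CLAIM (what is proved, stated in full; the proofs are below) =====
def Claim_equal_generate_alterations : Prop := ∀ (passwords : List String), Dom_generate_alterations passwords → Spec_generate_alterations passwords (generate_alterations passwords)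

-- ===== LEMMAS AND PROOFS =====
-- One password's contribution in A equals that password prefixed onto the suffix table.
theorem pv_stepA (acc : List String) (pw : String) :
    pvFirstLevel.foldl (fun acc alteration =>
      pvSecondLevel.foldl (fun acc2 two_alteration =>
        acc2 ++ [pw ++ alteration ++ two_alteration])
        (acc ++ [pw ++ alteration]))
      (acc ++ [pw]) = acc ++ pvSuffixes.map (fun s => pw ++ s) := by
  simp [pvFirstLevel, pvSecondLevel, pvSuffixes, List.foldl, String.append_assoc]

theorem pv_foldA (passwords : List String) (acc : List String) :
    passwords.foldl (fun altered pw =>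
      pvFirstLevel.foldl (fun acc alteration =>
        pvSecondLevel.foldl (fun acc2 two_alteration =>
          acc2 ++ [pw ++ alteration ++ two_alteration])
          (acc ++ [pw ++ alteration]))
        (altered ++ [pw])) acc
    = acc ++ passwords.flatMap (fun pw => pvSuffixes.map (fun s => pw ++ s)) := by
  induction passwords generalizing acc with
  | nil => simp
  | cons pw rest ih =>
    rw [List.foldl_cons, pv_stepA, ih, List.flatMap_cons, List.append_assoc]

-- ===== VERDICT (by name: the statement is the Claim_ definition above) =====
theorem generate_alterations_spec : Claim_equal_generate_alterations := by
  intro passwords _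
  show generate_alterations passwords = generate_alterations_alt passwords
  simpa [generate_alterations, generate_alterations_alt] using pv_foldA passwords []
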